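-- pv_equiv track=rewrite | github.com/BTheDragonMaster/parasect | src/parasect/core/domain.py | _get_gap_adjusted_positions
-- ===== SOURCE A (Python) =====
-- from typing import List, Optional, Tuple
--
-- def _get_gap_adjusted_positions(query: str, positions: list[int], offset: int) -> list[Optional[int]]:
--     """Return sequence positions adjusted for gaps
--
--     :param query: query sequence
--     :type query: str
--     :param positions: positions in the gapped query sequence
--     :type positions: list[int]
--     :param offset: query start position
--     :type offset: int
--     :return: list of gap-adjusted positions
--     :rtype: list[int]
--     """
--     adjusted_positions: list[Optional[int]] = []
--     position = offset
--     for i, char in enumerate(query):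
--         if i in positions:
--             if char != '-':
--                 adjusted_positions.append(position)
--             else:
--                 adjusted_positions.append(None)
--         if char != '-':
--             position += 1
--
--     return adjusted_positions
-- ===== SOURCE B (Python) =====
-- def _get_gap_adjusted_positions(query: str, positions: list, offset: int) -> list:
--     # Pass 1: precompute the gap-adjusted value for every index of the query.
--     table = []
--     position = offset
--     for char in query:
--         if char != '-':
--             table.append(position)
--             position += 1
--         else:
--             table.append(None)
--     # Pass 2: read off the wanted indices in ascending order, skipping out-of-range ones.
--     return [table[i] for i in sorted(set(positions)) if 0 <= i < len(query)]
-- ===== Notes on version B (the rewrite author's own statement) =====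
-- stated objective: faster
-- what changed: Replaces the per-character 'i in positions' list scan with two independent passes: one builds a table of gap-adjusted values per index, the other reads the table at sorted(set(positions)) filtered to range.
import Mathlib
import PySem

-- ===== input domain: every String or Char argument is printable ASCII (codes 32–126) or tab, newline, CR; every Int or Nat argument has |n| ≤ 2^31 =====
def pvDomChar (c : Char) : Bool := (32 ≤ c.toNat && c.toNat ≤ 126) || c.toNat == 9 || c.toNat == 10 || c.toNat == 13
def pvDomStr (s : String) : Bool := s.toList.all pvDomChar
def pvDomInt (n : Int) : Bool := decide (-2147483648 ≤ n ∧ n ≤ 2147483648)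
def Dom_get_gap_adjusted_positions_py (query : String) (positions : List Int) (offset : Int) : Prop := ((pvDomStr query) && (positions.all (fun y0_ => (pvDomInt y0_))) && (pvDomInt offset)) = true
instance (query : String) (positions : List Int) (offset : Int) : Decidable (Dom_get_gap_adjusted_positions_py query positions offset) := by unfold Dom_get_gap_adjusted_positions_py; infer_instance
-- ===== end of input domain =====

-- B replaces A's per-character 'i in positions' list scan with two independent passes
-- (a gap-adjusted table over the query, then a read-off over sorted(set(positions))).

-- ===== PORT A =====
/-- A's loop body: 'if i in positions: append adjusted value; if char != '-': position += 1'. -/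
def stepA (positions : List Int) (st : List (Option Int) × Int) (ic : Int × Char) : List (Option Int) × Int :=
  ((if positions.contains ic.1 then
      (if ic.2 ≠ '-' then st.1 ++ [some st.2] else st.1 ++ [none])
    else st.1),
   (if ic.2 ≠ '-' then st.2 + 1 else st.2))

def get_gap_adjusted_positions_py (query : String) (positions : List Int) (offset : Int) : List (Option Int) :=
  ((PySem.List.enumerate query.toList 0).foldl (stepA positions) ([], offset)).1

-- ===== PORT B =====
/-- B's first pass body: append the gap-adjusted value of the current index to the table. -/
def stepB (st : List (Option Int) × Int) (c : Char) : List (Option Int) × Int :=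
  if c ≠ '-' then (st.1 ++ [some st.2], st.2 + 1) else (st.1 ++ [none], st.2)

def get_gap_adjusted_positions_py_alt (query : String) (positions : List Int) (offset : Int) : List (Option Int) :=
  let table := (query.toList.foldl stepB ([], offset)).1
  (PySem.List.sorted (PySem.Set.ofList positions) (fun x => x) false).flatMap
    (fun i => if 0 ≤ i ∧ i < PySem.Str.len query then [PySem.List.pyGetD table i none] else [])

-- ===== PRECONDITION & SPEC =====
def Spec_get_gap_adjusted_positions_py (query : String) (positions : List Int) (offset : Int) (out : List (Option Int)) : Prop := out = get_gap_adjusted_positions_py_alt query positions offset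
instance (query : String) (positions : List Int) (offset : Int) (out : List (Option Int)) : Decidable (Spec_get_gap_adjusted_positions_py query positions offset out) := by unfold Spec_get_gap_adjusted_positions_py; infer_instance

-- ===== CLAIM (what is proved, stated in full; the proofs are below) =====
def Claim_equal_get_gap_adjusted_positions_py : Prop := ∀ (query : String) (positions : List Int) (offset : Int), Dom_get_gap_adjusted_positions_py query positions offset → Spec_get_gap_adjusted_positions_py query positions offset (get_gap_adjusted_positions_py query positions offset)

-- ===== LEMMAS AND PROOFS =====

/-- The gap-adjusted value of every index of the query, starting the counter at `p`. -/
def gapTable (p : Int) : List Char → List (Option Int)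
  | [] => []
  | c :: cs => if c = '-' then none :: gapTable p cs else some p :: gapTable (p + 1) cs

/-- What A's loop appends for the suffix `cs` starting at index `k` with counter `p`. -/
def selA (positions : List Int) : List Char → Int → Int → List (Option Int)
  | [], _, _ => []
  | c :: cs, k, p =>
    (if positions.contains k then [if c = '-' then none else some p] else [])
      ++ selA positions cs (k + 1) (if c = '-' then p else p + 1)

theorem A_loop (positions : List Int) (cs : List Char) :
    ∀ (k p : Int) (acc : List (Option Int)),
    ((PySem.List.enumerate cs k).foldl (stepA positions) (acc, p)).1
      = acc ++ selA positions cs k p := by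
  induction cs with
  | nil => intro k p acc; simp [PySem.List.enumerate_nil, selA]
  | cons c cs ih =>
    intro k p acc
    rw [PySem.List.enumerate_cons, List.foldl_cons]
    have hstep : stepA positions (acc, p) (k, c) =
        ((if positions.contains k then
            (if c ≠ '-' then acc ++ [some p] else acc ++ [none])
          else acc),
         (if c ≠ '-' then p + 1 else p)) := rfl
    rw [hstep]
    by_cases hm : positions.contains k = true <;> by_cases hc : c = '-' <;>
      simp [hc, ih, selA] <;> split_ifs <;> simp

theorem B_table (cs : List Char) :
    ∀ (acc : List (Option Int)) (p : Int),
    (cs.foldl stepB (acc, p)).1 = acc ++ gapTable p cs := by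
  induction cs with
  | nil => intro acc p; simp [gapTable]
  | cons c cs ih =>
    intro acc p
    rw [List.foldl_cons]
    have hstep : stepB (acc, p) c =
        (if c ≠ '-' then (acc ++ [some p], p + 1) else (acc ++ [none], p)) := rfl
    rw [hstep]
    by_cases hc : c = '-' <;> simp [hc, ih, gapTable]

theorem selA_flatMap (positions : List Int) (cs : List Char) :
    ∀ (k p : Int),
    selA positions cs k p = (List.range cs.length).flatMap
      (fun (j : Nat) =>
        if positions.contains (k + (j : Int)) then [(gapTable p cs).getD j none] else []) := by
  induction cs with
  | nil => intro k p; simp [selA]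
  | cons c cs ih =>
    intro k p
    rw [List.length_cons, List.range_succ_eq_map, List.flatMap_cons, List.flatMap_map]
    have hhead : (if positions.contains (k + ((0 : Nat) : Int)) then
        [(gapTable p (c :: cs)).getD 0 none] else [])
        = (if positions.contains k then [if c = '-' then none else some p] else []) := by
      by_cases hc : c = '-' <;> simp [gapTable, hc]
    have htail : ((List.range cs.length).flatMap fun (j : Nat) =>
        if positions.contains (k + ((j.succ : Nat) : Int)) then
          [(gapTable p (c :: cs)).getD j.succ none] else [])
        = selA positions cs (k + 1) (if c = '-' then p else p + 1) := by
      rw [ih]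
      refine (List.flatMap_congr ?_).symm
      intro j _
      by_cases hc : c = '-' <;>
        simp [gapTable, hc, show k + ((j : Int) + 1) = k + 1 + (j : Int) from by ring]
    rw [hhead, htail]
    simp [selA]

theorem flatMap_guard (L : List Int) (P : Int → Bool) (v : Int → Option Int) :
    L.flatMap (fun i => if P i then [v i] else []) = (L.filter P).map v := by
  induction L with
  | nil => rfl
  | cons a L ih =>
    rw [List.flatMap_cons, List.filter_cons]
    by_cases h : P a <;> simp [h, ih]

theorem sorted_mem_eq (l1 l2 : List Int) (h1 : l1.Pairwise (·<·)) (h2 : l2.Pairwise (·<·))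
    (h : ∀ a, a ∈ l1 ↔ a ∈ l2) : l1 = l2 :=
  (List.perm_of_nodup_nodup_toFinset_eq (h1.nodup) (h2.nodup) (by ext a; simp [h a])).eq_of_pairwise
    (fun _ _ _ _ hab hba => absurd hba (lt_asymm hab)) h1 h2

-- ===== VERDICT (by name: the statement is the Claim_ definition above) =====
theorem get_gap_adjusted_positions_py_spec : Claim_equal_get_gap_adjusted_positions_py := by
  intro query positions offset _
  unfold Spec_get_gap_adjusted_positions_py
  unfold get_gap_adjusted_positions_py get_gap_adjusted_positions_py_alt
  rw [A_loop positions query.toList 0 offset [], B_table query.toList [] offset]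
  simp only [List.nil_append]
  set cs := query.toList with hcs
  set n := cs.length with hn
  set T := gapTable offset cs with hT
  set P : Int → Bool := fun i => decide (i ∈ positions ∧ 0 ≤ i ∧ i < (n : Int)) with hP
  set v : Int → Option Int := fun i => T.getD i.toNat none with hv
  have hA : selA positions cs 0 offset
      = (((List.range n).map (Nat.cast : Nat → Int)).filter P).map v := by
    rw [selA_flatMap positions cs 0 offset, ← flatMap_guard, List.flatMap_map]
    refine List.flatMap_congr ?_
    intro j hj
    rw [List.mem_range] at hj
    have hrange : (0 ≤ ((j : Nat) : Int) ∧ ((j : Nat) : Int) < (n : Int)) :=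
      ⟨Int.natCast_nonneg j, by exact_mod_cast hj⟩
    by_cases hm : ((j : Nat) : Int) ∈ positions
    · have hPj : P ((j : Nat) : Int) = true := by simp [hP, hm, hrange]
      simp [hm, hPj, hv, ← hT]
    · have hPj : P ((j : Nat) : Int) = false := by simp [hP, hm]
      simp [hm, hPj]
  have hB : (PySem.List.sorted (PySem.Set.ofList positions) (fun x => x) false).flatMap
        (fun i => if 0 ≤ i ∧ i < PySem.Str.len query then [PySem.List.pyGetD T i none] else [])
      = ((PySem.List.sorted (PySem.Set.ofList positions) (fun x => x) false).filter P).map v := by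
    rw [← flatMap_guard]
    refine List.flatMap_congr ?_
    intro i hi
    have hmem : i ∈ positions :=
      (PySem.Set.mem_ofList _ _).mp ((PySem.List.mem_sorted _ _ _ _).mp hi)
    have hlen : PySem.Str.len query = (n : Int) := by
      simp [PySem.Str.len_eq, hn, hcs]
    rw [hlen]
    by_cases hcond : (0 ≤ i ∧ i < (n : Int))
    · have hPi : P i = true := by simp [hP, hmem, hcond]
      have hi' : ((i.toNat : Nat) : Int) = i := Int.toNat_of_nonneg hcond.1
      have hget : PySem.List.pyGetD T i none = v i := by
        have hvi : v i = T.getD i.toNat none := rfl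
        rw [hvi, ← hi', PySem.List.pyGetD_natCast]
        have h2 : (((i.toNat : Nat) : Int)).toNat = i.toNat := by omega
        rw [h2]
      simp [hcond, hPi, hget]
    · have hPi : P i = false := by
        simp only [hP, decide_eq_false_iff_not]
        rintro ⟨_, h2, h3⟩
        exact hcond ⟨h2, h3⟩
      simp [hcond, hPi]
  rw [hA, hB]
  congr 1
  apply sorted_mem_eq
  · refine List.Pairwise.filter _ ?_
    refine List.Pairwise.map _ ?_ (List.pairwise_lt_range)
    intro a b hab
    exact_mod_cast hab
  · exact (PySem.List.sorted_ofList_pairwise_lt positions).filter _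
  · intro a
    simp only [List.mem_filter, List.mem_map, List.mem_range, PySem.List.mem_sorted,
      PySem.Set.mem_ofList, hP, decide_eq_true_eq]
    constructor
    · rintro ⟨⟨j, hj, rfl⟩, hPa⟩
      exact ⟨hPa.1, hPa⟩
    · rintro ⟨_, hPa⟩
      exact ⟨⟨a.toNat, by omega, by omega⟩, hPa⟩
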